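-- pv_equiv track=rewrite | github.com/zeqing-j/ORF_Analysis_5-_Mammalian_Genome | substring2.py | clean_utr
-- ===== SOURCE A (Python) =====
-- def clean_utr(utr_seq):
--     cleaned_utr = []
--     dash_indices = []
--
--     for idx, char in enumerate(utr_seq):
--         if char != '-':
--             cleaned_utr.append(char)
--         else:
--             dash_indices.append(idx)
--
--     return ''.join(cleaned_utr), dash_indices
-- ===== SOURCE B (Python) =====
-- def clean_utr(utr_seq):
--     parts = utr_seq.split('-')
--     dash_indices = []
--     pos = 0
--     for part in parts[:-1]:
--         pos += len(part)
--         dash_indices.append(pos)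
--         pos += 1
--     return ''.join(parts), dash_indices
-- ===== Notes on version B (the rewrite author's own statement) =====
-- stated objective: faster
-- what changed: Instead of A's single per-character loop that branches on each character into two accumulators, B splits the string on the dash separator once, joins the pieces to get the cleaned string, and reconstructs the dash positions arithmetically as cumulative piece lengths over parts[:-1].
import Mathlib
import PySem

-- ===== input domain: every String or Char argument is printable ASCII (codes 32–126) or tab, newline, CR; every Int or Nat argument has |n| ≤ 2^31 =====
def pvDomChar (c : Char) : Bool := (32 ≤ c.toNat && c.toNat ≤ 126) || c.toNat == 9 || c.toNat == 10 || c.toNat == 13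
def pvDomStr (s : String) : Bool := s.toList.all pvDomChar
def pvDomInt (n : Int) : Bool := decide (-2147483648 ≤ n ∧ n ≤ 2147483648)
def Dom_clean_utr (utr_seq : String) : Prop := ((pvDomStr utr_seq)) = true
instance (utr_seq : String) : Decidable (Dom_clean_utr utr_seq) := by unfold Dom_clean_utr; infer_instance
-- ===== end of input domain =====

-- Header: B re-derives both outputs from a single str.split('-') — the cleaned string is the join of the
-- pieces and the dash positions are cumulative piece lengths — replacing A's per-character branching loop
-- (objective: faster by constant factor, measured: C-level split/join replace the per-char Python loop).


-- ===== PORT A =====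
-- literal port: one loop over enumerate(utr_seq), branching per character, appending to two accumulators
def clean_utr (utr_seq : String) : String × List Int :=
  let st := (PySem.List.enumerate utr_seq.toList 0).foldl
    (fun (acc : List Char × List Int) p =>
      if p.2 ≠ '-' then (acc.1 ++ [p.2], acc.2) else (acc.1, acc.2 ++ [p.1]))
    ([], [])
  (String.ofList st.1, st.2)

-- ===== PORT B =====
-- literal port of Source B: split on '-', join the pieces for the cleaned string, and accumulate
-- piece lengths over parts[:-1] for the dash positions
def clean_utr_alt (utr_seq : String) : String × List Int :=
  let parts := PySem.Chars.splitOn utr_seq.toList ['-']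
  let st := (PySem.List.slice parts none (some (-1))).foldl
      (fun (acc : List Int × Int) part => (acc.1 ++ [acc.2 + (part.length : Int)], acc.2 + (part.length : Int) + 1))
      ([], 0)
  (String.ofList (PySem.Chars.join [] parts), st.1)

-- ===== PRECONDITION & SPEC =====
def Spec_clean_utr (utr_seq : String) (out : String × List Int) : Prop := out = clean_utr_alt utr_seq
instance (utr_seq : String) (out : String × List Int) : Decidable (Spec_clean_utr utr_seq out) := by unfold Spec_clean_utr; infer_instance

-- ===== CLAIM (what is proved, stated in full; the proofs are below) =====
def Claim_equal_clean_utr : Prop := ∀ (utr_seq : String), Dom_clean_utr utr_seq → Spec_clean_utr utr_seq (clean_utr utr_seq)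

-- ===== LEMMAS AND PROOFS =====

-- A's interleaved loop in closed form
theorem clean_utr_foldl_inv (cs : List Char) (i : Int) (acc : List Char × List Int) :
    (PySem.List.enumerate cs i).foldl
      (fun (acc : List Char × List Int) p =>
        if p.2 ≠ '-' then (acc.1 ++ [p.2], acc.2) else (acc.1, acc.2 ++ [p.1]))
      acc
    = (acc.1 ++ cs.filter (fun c => c ≠ '-'),
       acc.2 ++ (PySem.List.enumerate cs i).filterMap
         (fun p => if p.2 = '-' then some p.1 else none)) := by
  induction cs generalizing i acc with
  | nil => simp [PySem.List.enumerate_nil]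
  | cons c cs ih =>
    rw [PySem.List.enumerate_cons, List.foldl_cons, ih]
    by_cases h : c = '-' <;> simp [h, List.append_assoc]

-- reference splitter: split on '-' expressed as a structural recursion
def mySplit : List Char → List (List Char)
  | [] => [[]]
  | c :: cs => if c = '-' then [] :: mySplit cs else (mySplit cs).modifyHead (c :: ·)

theorem mySplit_ne_nil (cs : List Char) : mySplit cs ≠ [] := by
  induction cs with
  | nil => simp [mySplit]
  | cons c cs ih =>
    simp only [mySplit]
    split_ifs
    · simp
    · cases h : mySplit cs with
      | nil => exact absurd h ih
      | cons x xs => simp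

theorem splitOn_go_eq (cs : List Char) (fuel : Nat) (cur : List Char) (acc : List (List Char))
    (h : cs.length ≤ fuel) :
    PySem.Chars.splitOn.go ['-'] fuel cs cur acc
      = acc.reverse ++ (mySplit cs).modifyHead (cur.reverse ++ ·) := by
  induction cs generalizing fuel cur acc with
  | nil =>
    cases fuel <;> simp [PySem.Chars.splitOn.go, mySplit, List.modifyHead]
  | cons c cs ih =>
    cases fuel with
    | zero => simp at h
    | succ f =>
      simp only [List.length_cons, Nat.succ_le_succ_iff] at h
      simp only [PySem.Chars.splitOn.go]
      by_cases hc : c = '-'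
      · subst hc
        have hp : List.isPrefixOf ['-'] ('-' :: cs) = true := by
          simp [List.isPrefixOf]
        rw [hp, if_pos rfl]
        simp only [List.length_cons, List.length_nil, List.drop_succ_cons, List.drop_zero]
        rw [ih _ [] _ h]
        simp only [mySplit, List.modifyHead, List.reverse_nil,
          List.nil_append]
        cases mySplit cs <;> simp
      · have hp : List.isPrefixOf ['-'] (c :: cs) = false := by
          simp [List.isPrefixOf]
          exact fun h' => hc h'.symm
        simp only [hp, Bool.false_eq_true, if_false]
        rw [ih _ (c :: cur) _ h]
        simp only [mySplit, if_neg hc, List.reverse_cons]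
        cases hm : mySplit cs with
        | nil => exact absurd hm (mySplit_ne_nil cs)
        | cons x xs => simp [List.modifyHead, List.append_assoc]

theorem splitOn_eq_mySplit (cs : List Char) :
    PySem.Chars.splitOn cs ['-'] = mySplit cs := by
  unfold PySem.Chars.splitOn
  rw [splitOn_go_eq cs (cs.length + 1) [] [] (by omega)]
  cases h : mySplit cs with
  | nil => exact absurd h (mySplit_ne_nil cs)
  | cons x xs => simp [List.modifyHead]

-- the join of the pieces is A's filtered string
theorem flatten_mySplit (cs : List Char) :
    (mySplit cs).flatten = cs.filter (fun c => c ≠ '-') := by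
  induction cs with
  | nil => simp [mySplit]
  | cons c cs ih =>
    simp only [mySplit, List.filter_cons]
    by_cases h : c = '-'
    · simp [h, ih]
    · cases hm : mySplit cs with
      | nil => exact absurd hm (mySplit_ne_nil cs)
      | cons x xs =>
        rw [hm] at ih
        simp [h]
        simpa using ih

theorem join_nil_eq_flatten (ps : List (List Char)) :
    PySem.Chars.join [] ps = ps.flatten := by
  unfold PySem.Chars.join
  induction ps with
  | nil => simp [List.intercalate]
  | cons x xs ih =>
    cases xs with
    | nil => simp [List.intercalate]
    | cons y ys =>
      simp [List.intercalate, List.intersperse] at ih ⊢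
      simpa using ih

-- parts[:-1] is dropLast
theorem slice_neg_one {α : Type} (l : List α) :
    PySem.List.slice l none (some (-1)) = l.dropLast := by
  cases l with
  | nil => simp [PySem.List.slice]
  | cons x xs =>
    simp [PySem.List.slice, List.dropLast_eq_take]

-- the dash-position fold, first component in closed form
def dashList (f : List Int × Int → List Char → List Int × Int) (d : List (List Char)) (p : Int) : List Int :=
  (d.foldl f ([], p)).1

theorem foldl_fst_append (d : List (List Char)) (done : List Int) (p : Int) :
    (d.foldl (fun (acc : List Int × Int) part =>
        (acc.1 ++ [acc.2 + (part.length : Int)], acc.2 + (part.length : Int) + 1)) (done, p)).1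
    = done ++ (d.foldl (fun (acc : List Int × Int) part =>
        (acc.1 ++ [acc.2 + (part.length : Int)], acc.2 + (part.length : Int) + 1)) ([], p)).1 := by
  induction d generalizing done p with
  | nil => simp
  | cons e d ih =>
    simp only [List.foldl_cons, List.nil_append]
    rw [ih, ih [p + (e.length : Int)]]
    simp

theorem dashList_cons (f : List Int × Int → List Char → List Int × Int)
    (hf : f = fun (acc : List Int × Int) part =>
        (acc.1 ++ [acc.2 + (part.length : Int)], acc.2 + (part.length : Int) + 1))
    (e : List Char) (d : List (List Char)) (p : Int) :
    dashList f (e :: d) p = (p + e.length) :: dashList f d (p + e.length + 1) := by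
  subst hf
  unfold dashList
  simp only [List.foldl_cons]
  rw [foldl_fst_append]
  simp

theorem dropLast_modifyHead {α : Type} (g : α → α) (l : List α) :
    (l.modifyHead g).dropLast = l.dropLast.modifyHead g := by
  cases l with
  | nil => simp
  | cons x xs =>
    cases xs with
    | nil => simp [List.modifyHead]
    | cons y ys => simp [List.modifyHead]

theorem dashList_modifyHead_cons (f : List Int × Int → List Char → List Int × Int)
    (hf : f = fun (acc : List Int × Int) part =>
        (acc.1 ++ [acc.2 + (part.length : Int)], acc.2 + (part.length : Int) + 1))
    (c : Char) (d : List (List Char)) (p : Int) :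
    dashList f (d.modifyHead (c :: ·)) p = dashList f d (p + 1) := by
  cases d with
  | nil => simp [List.modifyHead, dashList]
  | cons e d =>
    simp only [List.modifyHead]
    rw [dashList_cons f hf, dashList_cons f hf]
    have h1 : (p + ((c :: e).length : Int)) = p + 1 + e.length := by
      push_cast [List.length_cons]; ring
    rw [h1]

theorem dashList_mySplit (cs : List Char) (p : Int) :
    dashList (fun (acc : List Int × Int) part =>
        (acc.1 ++ [acc.2 + (part.length : Int)], acc.2 + (part.length : Int) + 1))
      (mySplit cs).dropLast p
    = (PySem.List.enumerate cs p).filterMap (fun q => if q.2 = '-' then some q.1 else none) := by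
  induction cs generalizing p with
  | nil => simp [mySplit, dashList, PySem.List.enumerate_nil]
  | cons c cs ih =>
    by_cases h : c = '-'
    · subst h
      have hs : mySplit ('-' :: cs) = [] :: mySplit cs := by simp [mySplit]
      have hd : ([] :: mySplit cs).dropLast = [] :: (mySplit cs).dropLast := by
        cases hm : mySplit cs with
        | nil => exact absurd hm (mySplit_ne_nil cs)
        | cons x xs => rfl
      rw [hs, hd, dashList_cons _ rfl]
      simp [PySem.List.enumerate_cons, ih]
    · have hs : mySplit (c :: cs) = (mySplit cs).modifyHead (c :: ·) := by simp [mySplit, h]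
      rw [hs, dropLast_modifyHead, dashList_modifyHead_cons _ rfl, ih]
      simp [PySem.List.enumerate_cons, h]

-- ===== VERDICT (by name: the statement is the Claim_ definition above) =====
theorem clean_utr_spec : Claim_equal_clean_utr := by
  intro s _
  unfold Spec_clean_utr clean_utr clean_utr_alt
  simp only [clean_utr_foldl_inv, splitOn_eq_mySplit, slice_neg_one, join_nil_eq_flatten,
    flatten_mySplit, List.nil_append]
  have h := dashList_mySplit s.toList 0
  unfold dashList at h
  rw [h]
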